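-- pv_equiv track=rewrite | github.com/sueszli/vector-database-benchmark | dataset/python-mutated/sympy_parser.py | lambda_notation
-- ===== SOURCE A (Python) =====
-- from tokenize import generate_tokens, untokenize, TokenError, NUMBER, STRING, NAME, OP, ENDMARKER, ERRORTOKEN, NEWLINE
-- from typing import Tuple as tTuple, Dict as tDict, Any, Callable, List, Optional, Union as tUnion
--
-- TOKEN = tTuple[int, str]
--
-- DICT = tDict[str, Any]
--
-- def lambda_notation(tokens: List[TOKEN], local_dict: DICT, global_dict: DICT):
--     if False:
--         while True:
--             i = 10
--     'Substitutes "lambda" with its SymPy equivalent Lambda().\n    However, the conversion does not take place if only "lambda"\n    is passed because that is a syntax error.\n\n    '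
--     result: List[TOKEN] = []
--     flag = False
--     (toknum, tokval) = tokens[0]
--     tokLen = len(tokens)
--     if toknum == NAME and tokval == 'lambda':
--         if tokLen == 2 or (tokLen == 3 and tokens[1][0] == NEWLINE):
--             result.extend(tokens)
--         elif tokLen > 2:
--             result.extend([(NAME, 'Lambda'), (OP, '('), (OP, '('), (OP, ')'), (OP, ')')])
--             for (tokNum, tokVal) in tokens[1:]:
--                 if tokNum == OP and tokVal == ':':
--                     tokVal = ','
--                     flag = True
--                 if not flag and tokNum == OP and (tokVal in ('*', '**')):
--                     raise TokenError('Starred arguments in lambda not supported')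
--                 if flag:
--                     result.insert(-1, (tokNum, tokVal))
--                 else:
--                     result.insert(-2, (tokNum, tokVal))
--     else:
--         result.extend(tokens)
--     return result
-- ===== SOURCE B (Python) =====
-- from typing import Tuple as tTuple, Dict as tDict, Any, List
--
-- # token constants from the stdlib 'tokenize' module (not importable here)
-- NAME = 1
-- OP = 54
-- NEWLINE = 4
--
--
-- class TokenError(Exception):
--     pass
--
--
-- TOKEN = tTuple[int, str]
-- DICT = tDict[str, Any]
--
--
-- def lambda_notation(tokens: List[TOKEN], local_dict: DICT, global_dict: DICT):
--     """Substitute "lambda" with Lambda(): find the first ':' boundary, then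
--     build the result by slicing and concatenation (no per-token flag/insert)."""
--     toknum, tokval = tokens[0]
--     n = len(tokens)
--     if toknum != NAME or tokval != 'lambda':
--         return list(tokens)
--     if n <= 2 or (n == 3 and tokens[1][0] == NEWLINE):
--         # bare "lambda" (with or without a trailing token): leave it untouched
--         return list(tokens)
--     rest = tokens[1:]
--     colon = next((i for i, (num, val) in enumerate(rest)
--                   if num == OP and val == ':'), len(rest))
--     params = rest[:colon]
--     if any(num == OP and val in ('*', '**') for num, val in params):
--         raise TokenError('Starred arguments in lambda not supported')
--     body = [(num, ',') if num == OP and val == ':' else (num, val)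
--             for num, val in rest[colon:]]
--     return ([(NAME, 'Lambda'), (OP, '('), (OP, '(')] + params
--             + [(OP, ')')] + body + [(OP, ')')])
-- ===== Notes on version B (the rewrite author's own statement) =====
-- stated objective: simpler
-- what changed: A threads a per-token 'flag' through one loop and grows the result with positional insert(-1)/insert(-2) calls into a pre-seeded 5-token skeleton; B first locates the first ':' OP boundary in tokens[1:], checks the parameter slice for '*'/'**', and builds the result in one shot by list slicing and concatenation with a comprehension turning every ':' into ','.
-- intended difference: On the single-token input [(NAME,'lambda')] A returns [] (silently dropping the token), while B returns the tokens unchanged, which is the intended value: the docstring says a bare 'lambda' is left untouched as a syntax error for the caller, exactly as A already does for the two-token case. — e.g. on lambda_notation([(1, "lambda")], [], []): A returns [], B returns [(1, "lambda")]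
import Mathlib
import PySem

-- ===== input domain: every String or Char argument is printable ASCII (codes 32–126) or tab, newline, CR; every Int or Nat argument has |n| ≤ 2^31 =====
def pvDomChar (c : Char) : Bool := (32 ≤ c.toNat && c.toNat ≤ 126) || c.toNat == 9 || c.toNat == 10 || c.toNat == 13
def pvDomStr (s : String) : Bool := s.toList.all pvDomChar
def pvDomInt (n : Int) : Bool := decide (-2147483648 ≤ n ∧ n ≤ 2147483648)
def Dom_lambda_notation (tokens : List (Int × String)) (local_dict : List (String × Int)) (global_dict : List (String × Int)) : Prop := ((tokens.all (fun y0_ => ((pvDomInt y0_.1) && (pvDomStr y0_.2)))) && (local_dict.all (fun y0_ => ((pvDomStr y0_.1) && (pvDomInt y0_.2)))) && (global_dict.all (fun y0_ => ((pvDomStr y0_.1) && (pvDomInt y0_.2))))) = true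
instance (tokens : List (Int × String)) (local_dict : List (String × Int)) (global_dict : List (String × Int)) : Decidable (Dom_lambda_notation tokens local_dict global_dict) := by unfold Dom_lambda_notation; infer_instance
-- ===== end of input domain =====

-- B replaces A's per-token flag/insert(-1)/insert(-2) loop by find-the-colon-boundary then build by
-- slicing/concatenation (objective: simpler); B returns tokens unchanged on the bare [(NAME,'lambda')]
-- input where A returns [] — see D_lambda_notation.

-- ===== PORT A =====
-- one loop step of A: state = (result, flag, err); err marks the raised TokenError (input excluded by Pre_)
def aStep (st : List (Int × String) × Bool × Bool) (tk : Int × String) : List (Int × String) × Bool × Bool :=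
  if st.2.2 then st
  else
    let isColon := tk.1 == 54 && tk.2 == ":"
    let v := if isColon then "," else tk.2
    let flag := st.2.1 || isColon
    if !flag && tk.1 == 54 && (v == "*" || v == "**") then (st.1, flag, true)
    else (PySem.List.insert st.1 (if flag then -1 else -2) (tk.1, v), flag, false)

def lambda_notation (tokens : List (Int × String)) (local_dict : List (String × Int)) (global_dict : List (String × Int)) : List (Int × String) :=
  match tokens with
  | [] => []   -- tokens[0] raises IndexError; excluded by Pre_
  | (toknum, tokval) :: _ =>
    if toknum == 1 && tokval == "lambda" then
      if tokens.length == 2 || (tokens.length == 3 && ((tokens.drop 1).headD (0, "")).1 == 4) then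
        tokens
      else if 2 < tokens.length then
        let st := (tokens.drop 1).foldl aStep
          ([(1, "Lambda"), (54, "("), (54, "("), (54, ")"), (54, ")")], false, false)
        if st.2.2 then [] else st.1   -- err = raised TokenError; excluded by Pre_
      else []   -- tokLen == 1: result stays []
    else tokens

-- ===== PORT B =====
def bIsColon (t : Int × String) : Bool := t.1 == 54 && t.2 == ":"
def bIsStar (t : Int × String) : Bool := t.1 == 54 && (t.2 == "*" || t.2 == "**")
def bSub (t : Int × String) : Int × String := if bIsColon t then (t.1, ",") else t

def lambda_notation_alt (tokens : List (Int × String)) (local_dict : List (String × Int)) (global_dict : List (String × Int)) : List (Int × String) :=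
  match tokens with
  | [] => []   -- tokens[0] raises IndexError; excluded by Pre_
  | (toknum, tokval) :: rest =>
    if !(toknum == 1 && tokval == "lambda") then tokens
    else if tokens.length ≤ 2 || (tokens.length == 3 && (rest.headD (0, "")).1 == 4) then tokens
    else
      let params := rest.takeWhile (fun t => !bIsColon t)   -- rest[:colon]
      if params.any bIsStar then []   -- raise TokenError; excluded by Pre_
      else
        let body := (rest.dropWhile (fun t => !bIsColon t)).map bSub   -- rest[colon:], ':' ↦ ','
        [(1, "Lambda"), (54, "("), (54, "(")] ++ params ++ [(54, ")")] ++ body ++ [(54, ")")]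

-- ===== PRECONDITION & SPEC =====
-- Pre_ excludes the inputs on which A raises: the empty token list (IndexError on tokens[0]) and, in the
-- rewriting branch, a '*'/'**' OP token among tokens[1:] before the first ':' OP (TokenError).
def Pre_lambda_notation (tokens : List (Int × String)) (local_dict : List (String × Int)) (global_dict : List (String × Int)) : Prop :=
  tokens ≠ [] ∧
  ((tokens.head? = some (1, "lambda") ∧ 2 < tokens.length ∧
      ¬(tokens.length = 3 ∧ ((tokens.drop 1).headD (0, "")).1 = 4)) →
    ∀ t ∈ (tokens.drop 1).takeWhile (fun t => !(t.1 == 54 && t.2 == ":")),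
      ¬(t.1 = 54 ∧ (t.2 = "*" ∨ t.2 = "**")))
instance (tokens : List (Int × String)) (local_dict : List (String × Int)) (global_dict : List (String × Int)) : Decidable (Pre_lambda_notation tokens local_dict global_dict) := by unfold Pre_lambda_notation; infer_instance

def pvWitness_lambda_notation : (List (Int × String)) × (List (String × Int)) × (List (String × Int)) :=
  ([(1, "lambda"), (1, "x"), (54, ":"), (1, "x")], [], [])

-- On the single-token input [(NAME,'lambda')] A returns [] (dropping the token); B returns the tokens
-- unchanged, which is the intended value: the docstring says a bare 'lambda' is left alone (a syntax
-- error for the caller), exactly as A already does for the two-token case.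
def D_lambda_notation (tokens : List (Int × String)) (local_dict : List (String × Int)) (global_dict : List (String × Int)) : Prop :=
  tokens.tail = [] ∧ tokens.head? = some ((1 : Int), "lambda")
instance (tokens : List (Int × String)) (local_dict : List (String × Int)) (global_dict : List (String × Int)) : Decidable (D_lambda_notation tokens local_dict global_dict) := by unfold D_lambda_notation; infer_instance

def Spec_lambda_notation (tokens : List (Int × String)) (local_dict : List (String × Int)) (global_dict : List (String × Int)) (out : List (Int × String)) : Prop := ¬ D_lambda_notation tokens local_dict global_dict → out = lambda_notation_alt tokens local_dict global_dict
instance (tokens : List (Int × String)) (local_dict : List (String × Int)) (global_dict : List (String × Int)) (out : List (Int × String)) : Decidable (Spec_lambda_notation tokens local_dict global_dict out) := by unfold Spec_lambda_notation; infer_instance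

def pvDiffWitness_lambda_notation : (List (Int × String)) × (List (String × Int)) × (List (String × Int)) :=
  ([(1, "lambda")], [], [])
def pvDiffWitnessOut_lambda_notation : (List (Int × String)) × (List (Int × String)) :=
  ([], [(1, "lambda")])

-- ===== CLAIM (what is proved, stated in full; the proofs are below) =====
def Claim_unchanged_lambda_notation : Prop := ∀ (tokens : List (Int × String)) (local_dict : List (String × Int)) (global_dict : List (String × Int)), Dom_lambda_notation tokens local_dict global_dict → Pre_lambda_notation tokens local_dict global_dict → Spec_lambda_notation tokens local_dict global_dict (lambda_notation tokens local_dict global_dict)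
def Claim_changed_lambda_notation : Prop := Dom_lambda_notation (pvDiffWitness_lambda_notation.1) (pvDiffWitness_lambda_notation.2.1) (pvDiffWitness_lambda_notation.2.2) ∧ Pre_lambda_notation (pvDiffWitness_lambda_notation.1) (pvDiffWitness_lambda_notation.2.1) (pvDiffWitness_lambda_notation.2.2) ∧ D_lambda_notation (pvDiffWitness_lambda_notation.1) (pvDiffWitness_lambda_notation.2.1) (pvDiffWitness_lambda_notation.2.2) ∧ lambda_notation (pvDiffWitness_lambda_notation.1) (pvDiffWitness_lambda_notation.2.1) (pvDiffWitness_lambda_notation.2.2) = pvDiffWitnessOut_lambda_notation.1 ∧ lambda_notation_alt (pvDiffWitness_lambda_notation.1) (pvDiffWitness_lambda_notation.2.1) (pvDiffWitness_lambda_notation.2.2) = pvDiffWitnessOut_lambda_notation.2 ∧ pvDiffWitnessOut_lambda_notation.1 ≠ pvDiffWitnessOut_lambda_notation.2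
def Claim_exact_lambda_notation : Prop := ∀ (tokens : List (Int × String)) (local_dict : List (String × Int)) (global_dict : List (String × Int)), Dom_lambda_notation tokens local_dict global_dict → Pre_lambda_notation tokens local_dict global_dict → D_lambda_notation tokens local_dict global_dict → lambda_notation tokens local_dict global_dict ≠ lambda_notation_alt tokens local_dict global_dict

-- ===== LEMMAS AND PROOFS =====

theorem insert_neg_one {α : Type} (l : List α) (b x : α) :
    PySem.List.insert (l ++ [b]) (-1) x = l ++ [x, b] := by
  have h : ∀ n : Nat, PySem.List.sliceIndices n (some (-1)) none 1 = (max ((-1) + (n : Int)) 0, (n : Int), 1) := by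
    intro n; simp [PySem.List.sliceIndices]
  simp only [PySem.List.insert, h]
  have h2 : ((max (-1 + ((l ++ [b]).length : Int)) 0)).toNat = l.length := by simp
  rw [h2, List.take_left' rfl, List.drop_left' rfl]

theorem insert_neg_two {α : Type} (l : List α) (a b x : α) :
    PySem.List.insert (l ++ [a, b]) (-2) x = l ++ [x, a, b] := by
  have h : ∀ n : Nat, PySem.List.sliceIndices n (some (-2)) none 1 = (max ((-2) + (n : Int)) 0, (n : Int), 1) := by
    intro n; simp [PySem.List.sliceIndices]
  simp only [PySem.List.insert, h]
  have h2 : ((max (-2 + ((l ++ [a, b]).length : Int)) 0)).toNat = l.length := by simp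
  rw [h2, List.take_left' rfl, List.drop_left' rfl]

theorem aStep_flag_true (front : List (Int × String)) (t : Int × String) :
    aStep (front ++ [((54 : Int), ")")], true, false) t
      = (front ++ [bSub t, ((54 : Int), ")")], true, false) := by
  simp only [aStep, bSub, bIsColon]
  by_cases h : (t.1 == 54 && t.2 == ":") = true
  · simp [h, insert_neg_one]
  · simp [h, insert_neg_one]

theorem foldl_flag_true (ts : List (Int × String)) (front : List (Int × String)) :
    ts.foldl aStep (front ++ [((54 : Int), ")")], true, false)
      = (front ++ ts.map bSub ++ [((54 : Int), ")")], true, false) := by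
  induction ts generalizing front with
  | nil => simp
  | cons t ts ih =>
    rw [List.foldl_cons, aStep_flag_true]
    have : front ++ [bSub t, ((54 : Int), ")")] = (front ++ [bSub t]) ++ [((54 : Int), ")")] := by simp
    rw [this, ih]
    simp

theorem foldl_flag_false (ts : List (Int × String)) (acc : List (Int × String))
    (h : ∀ t ∈ ts.takeWhile (fun t => !(t.1 == 54 && t.2 == ":")),
        ¬(t.1 = 54 ∧ (t.2 = "*" ∨ t.2 = "**"))) :
    ts.foldl aStep
        ([((1 : Int), "Lambda"), (54, "("), (54, "(")] ++ acc ++ [((54 : Int), ")"), (54, ")")], false, false)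
      = ([((1 : Int), "Lambda"), (54, "("), (54, "(")] ++ acc
          ++ ts.takeWhile (fun t => !bIsColon t) ++ [((54 : Int), ")")]
          ++ (ts.dropWhile (fun t => !bIsColon t)).map bSub ++ [((54 : Int), ")")],
         ts.any bIsColon, false) := by
  induction ts generalizing acc with
  | nil => simp
  | cons t ts ih =>
    by_cases hc : bIsColon t = true
    · -- the first colon: flag flips, insert at -1, then the flag-true phase
      rw [List.foldl_cons]
      have hc' : (t.1 == 54 && t.2 == ":") = true := by simpa [bIsColon] using hc
      have hstep : aStep ([((1 : Int), "Lambda"), (54, "("), (54, "(")] ++ acc ++ [((54 : Int), ")"), (54, ")")], false, false) t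
          = (([((1 : Int), "Lambda"), (54, "("), (54, "(")] ++ acc ++ [((54 : Int), ")")] ++ [bSub t]) ++ [((54 : Int), ")")], true, false) := by
        simp only [aStep]
        simp [hc']
        rw [show (1, "Lambda") :: ((54 : Int), "(") :: (54, "(") :: (acc ++ [((54 : Int), ")"), (54, ")")])
              = ((1, "Lambda") :: ((54 : Int), "(") :: (54, "(") :: (acc ++ [((54 : Int), ")")])) ++ [((54 : Int), ")")] from by simp]
        rw [insert_neg_one]
        simp [bSub, bIsColon, hc']
      rw [hstep, foldl_flag_true]
      simp [hc]
    · -- before the colon: a parameter token, insert at -2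
      rw [List.foldl_cons]
      have hc' : (t.1 == 54 && t.2 == ":") = false := by simpa [bIsColon] using hc
      have hcond : (!(t.1 == 54 && t.2 == ":")) = true := by simp [hc']
      have hs : ¬(t.1 = 54 ∧ (t.2 = "*" ∨ t.2 = "**")) := by
        apply h
        rw [List.takeWhile_cons, if_pos hcond]
        exact List.mem_cons_self
      have hs' : (t.1 == 54 && (t.2 == "*" || t.2 == "**")) = false := by
        simp only [Bool.and_eq_false_iff, beq_eq_false_iff_ne, Bool.or_eq_false_iff]
        by_cases h1 : t.1 = 54
        · right; constructor <;> simp_all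
        · left; simpa using h1
      have hstep : aStep ([((1 : Int), "Lambda"), (54, "("), (54, "(")] ++ acc ++ [((54 : Int), ")"), (54, ")")], false, false) t
          = ([((1 : Int), "Lambda"), (54, "("), (54, "(")] ++ (acc ++ [t]) ++ [((54 : Int), ")"), (54, ")")], false, false) := by
        simp only [aStep]
        simp [hc', hs']
        rw [show (1, "Lambda") :: ((54 : Int), "(") :: (54, "(") :: (acc ++ [((54 : Int), ")"), (54, ")")])
              = ((1, "Lambda") :: ((54 : Int), "(") :: (54, "(") :: acc) ++ [((54 : Int), ")"), (54, ")")] from by simp]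
        rw [insert_neg_two]
        simp
      rw [hstep, ih (acc ++ [t])]
      · have hb : (!bIsColon t) = true := by simp [hc]
        rw [List.takeWhile_cons, if_pos hb, List.dropWhile_cons, if_pos hb]
        simp [hc]
      · intro u hu
        apply h
        rw [List.takeWhile_cons, if_pos hcond]
        exact List.mem_cons_of_mem _ hu

theorem any_star_false (ts : List (Int × String))
    (h : ∀ t ∈ ts.takeWhile (fun t => !(t.1 == 54 && t.2 == ":")),
        ¬(t.1 = 54 ∧ (t.2 = "*" ∨ t.2 = "**"))) :
    (ts.takeWhile (fun t => !bIsColon t)).any bIsStar = false := by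
  rw [List.any_eq_false]
  intro t ht
  have ht' : t ∈ ts.takeWhile (fun t => !(t.1 == 54 && t.2 == ":")) := by
    simpa [bIsColon] using ht
  have := h t ht'
  simp only [bIsStar]
  simpa using this

-- ===== VERDICT (by name: the statement is the Claim_ definition above) =====
theorem lambda_notation_spec : Claim_unchanged_lambda_notation := by
  intro tokens local_dict global_dict _ hPre hD
  obtain ⟨hne, hstar⟩ := hPre
  match tokens, hD with
  | [], _ => exact absurd rfl hne
  | (n, v) :: rest, hD =>
    by_cases hl : (n == 1 && v == "lambda") = true
    · obtain ⟨hn1, hv⟩ : n = 1 ∧ v = "lambda" := by simpa using hl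
      subst hn1; subst hv
      match rest with
      | [] => exact absurd ⟨rfl, rfl⟩ hD
      | [t1] => simp [lambda_notation, lambda_notation_alt]
      | t1 :: t2 :: rest2 =>
        by_cases hnl : ((rest2.length + 3 == 3) && (t1.1 == 4)) = true
        · -- the "lambda NEWLINE" three-token early return
          obtain ⟨h3, h4⟩ : rest2.length + 3 = 3 ∧ t1.1 = 4 := by simpa using hnl
          have hr : rest2 = [] := List.length_eq_zero_iff.mp (by omega)
          subst hr
          simp [lambda_notation, lambda_notation_alt, h4]
        · have h : ∀ t ∈ (t1 :: t2 :: rest2).takeWhile (fun t => !(t.1 == 54 && t.2 == ":")),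
              ¬(t.1 = 54 ∧ (t.2 = "*" ∨ t.2 = "**")) := by
            apply hstar
            refine ⟨rfl, by simp, ?_⟩
            intro ⟨hlen, hhd⟩
            apply hnl
            simp at hlen ⊢
            exact ⟨by omega, by simpa using hhd⟩
          have hfold := foldl_flag_false (t1 :: t2 :: rest2) [] h
          have hany := any_star_false (t1 :: t2 :: rest2) h
          simp only [lambda_notation, lambda_notation_alt]
          simp only [List.drop_one, List.tail_cons]
          rw [show ([((1 : Int), "Lambda"), (54, "("), (54, "("), (54, ")"), (54, ")")] : List (Int × String))
                = [((1 : Int), "Lambda"), (54, "("), (54, "(")] ++ [] ++ [((54 : Int), ")"), (54, ")")] from by simp]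
          rw [hfold]
          simp [hany]
    · simp [lambda_notation, lambda_notation_alt, hl]

theorem lambda_notation_changed : Claim_changed_lambda_notation := by
  unfold Claim_changed_lambda_notation; decide

theorem lambda_notation_tight : Claim_exact_lambda_notation := by
  intro tokens local_dict global_dict _ _ hD
  obtain ⟨h2, h1⟩ := hD
  match tokens, h1, h2 with
  | t :: rest, h1, h2 =>
    have ht : t = ((1 : Int), "lambda") := by simpa using h1
    have hr : rest = [] := by simpa using h2
    subst ht; subst hr
    simp [lambda_notation, lambda_notation_alt]
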